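-- pv_equiv track=rewrite | github.com/Wal-K-aWay/M3-Verse_pipeline | 3_QA_generation/generators/base_generator.py | find_frame_unions
-- ===== SOURCE A (Python) =====
-- from typing import Dict, List, Any, Optional, Tuple
--
-- def find_frame_unions(frames_list: List[List[int]]) -> List[int]:
--     """
--     Find the union of frame numbers between multiple lists of frame numbers.
--
--     Args:
--         frames_list: List of frame number lists
--
--     Returns:
--         List of frame numbers that represent the union
--     """
--     if not frames_list:
--         return []
--
--     # Convert all frame lists to sets of individual frame numbers
--     all_frame_sets = []
--     for frames in frames_list:
--         all_frame_sets.append(set(frames))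
--
--     # Find union of all frame sets
--     union_frames = all_frame_sets[0]
--     for frame_set in all_frame_sets[1:]:
--         union_frames = union_frames.union(frame_set)
--
--     if not union_frames:
--         return []
--
--     # Sort the union frames
--     sorted_frames = sorted(list(union_frames))
--
--     return sorted_frames
-- ===== SOURCE B (Python) =====
-- def find_frame_unions(frames_list):
--     """Sorted union via flatten + sort + adjacent-dedup walk (no sets)."""
--     flat = [x for frames in frames_list for x in frames]
--     flat.sort()
--     result = []
--     for x in flat:
--         if not result or result[-1] != x:
--             result.append(x)
--     return result
-- ===== Notes on version B (the rewrite author's own statement) =====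
-- stated objective: idiomatic
-- what changed: Replaces the per-list set construction and chained set unions with a single flatten, one sort, and a linear walk that appends an element only when it differs from the last appended one (sorted-adjacency dedup); no set is built at all.
import Mathlib
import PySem

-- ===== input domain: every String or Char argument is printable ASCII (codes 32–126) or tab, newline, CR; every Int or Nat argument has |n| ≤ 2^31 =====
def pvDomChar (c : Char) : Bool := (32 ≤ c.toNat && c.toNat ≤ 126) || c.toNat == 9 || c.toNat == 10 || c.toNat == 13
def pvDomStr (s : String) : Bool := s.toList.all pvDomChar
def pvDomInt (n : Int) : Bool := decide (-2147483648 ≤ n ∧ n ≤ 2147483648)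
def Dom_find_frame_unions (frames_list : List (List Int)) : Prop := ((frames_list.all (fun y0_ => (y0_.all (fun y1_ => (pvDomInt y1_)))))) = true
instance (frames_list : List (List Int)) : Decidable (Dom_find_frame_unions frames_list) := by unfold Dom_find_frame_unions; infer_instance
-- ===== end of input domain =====

-- B replaces A's set-of-each-list + chained unions + sort by flatten, sort, and a
-- linear adjacent-dedup walk (no set at all); same results, similar cost (objective: idiomatic).

-- ===== PORT A =====
def find_frame_unions (frames_list : List (List Int)) : List Int :=
  if frames_list = [] then []
  else
    -- for frames in frames_list: all_frame_sets.append(set(frames))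
    let all_frame_sets : List (PySem.Set Int) :=
      frames_list.foldl (fun acc frames => acc ++ [PySem.Set.ofList frames]) []
    -- union_frames = all_frame_sets[0]; for frame_set in all_frame_sets[1:]: union = union.union(frame_set)
    -- (frames_list ≠ [] here, so all_frame_sets[0] exists: headD is exact)
    let union_frames : PySem.Set Int :=
      (all_frame_sets.drop 1).foldl (fun u s => PySem.Set.union u s) (all_frame_sets.headD [])
    if union_frames = [] then []
    else PySem.List.sorted union_frames (fun x => x) false

-- ===== PORT B =====
def find_frame_unions_alt (frames_list : List (List Int)) : List Int :=
  -- flat = [x for frames in frames_list for x in frames]; flat.sort()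
  let flat : List Int := frames_list.foldl (fun acc frames => acc ++ frames) []
  let s := PySem.List.sorted flat (fun x => x) false
  -- for x in s: if not result or result[-1] != x: result.append(x)
  -- (result[-1] on a nonempty result is its last element: getLast? is exact under the guard)
  s.foldl (fun res x => if res = [] ∨ res.getLast? ≠ some x then res ++ [x] else res) []

-- ===== PRECONDITION & SPEC =====
def Spec_find_frame_unions (frames_list : List (List Int)) (out : List Int) : Prop := out = find_frame_unions_alt frames_list
instance (frames_list : List (List Int)) (out : List Int) : Decidable (Spec_find_frame_unions frames_list out) := by unfold Spec_find_frame_unions; infer_instance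

-- ===== CLAIM (what is proved, stated in full; the proofs are below) =====
def Claim_equal_find_frame_unions : Prop := ∀ (frames_list : List (List Int)), Dom_find_frame_unions frames_list → Spec_find_frame_unions frames_list (find_frame_unions frames_list)

-- ===== LEMMAS AND PROOFS =====

-- the dedup-walk step of B
def pvStep (res : List Int) (x : Int) : List Int :=
  if res = [] ∨ res.getLast? ≠ some x then res ++ [x] else res

lemma pvStep_mem (res : List Int) (x y : Int) :
    y ∈ pvStep res x ↔ y ∈ res ∨ y = x := by
  unfold pvStep
  split_ifs with h
  · simp
  · push Not at h
    have hx : x ∈ res := List.mem_of_getLast? h.2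
    constructor
    · exact Or.inl
    · rintro (hy | rfl) <;> [exact hy; exact hx]

lemma pvWalk_mem (s : List Int) : ∀ (res : List Int) (y : Int),
    y ∈ s.foldl pvStep res ↔ y ∈ res ∨ y ∈ s := by
  induction s with
  | nil => simp
  | cons x t ih =>
    intro res y
    simp only [List.foldl_cons, ih, pvStep_mem, List.mem_cons]
    tauto

lemma pvLe_getLast (res : List Int) (hpw : res.Pairwise (· < ·)) (l : Int)
    (hl : res.getLast? = some l) : ∀ a ∈ res, a ≤ l := by
  induction res with
  | nil => simp at hl
  | cons x t ih =>
    intro a ha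
    cases t with
    | nil =>
      simp at hl ha; omega
    | cons y u =>
      have hl' : (y :: u).getLast? = some l := by
        simpa [List.getLast?_cons_cons] using hl
      have hlmem : l ∈ y :: u := List.mem_of_getLast? hl'
      rcases List.mem_cons.mp ha with rfl | ha'
      · exact le_of_lt ((List.pairwise_cons.mp hpw).1 l hlmem)
      · exact ih (List.pairwise_cons.mp hpw).2 hl' a ha'

lemma pvWalk_pairwise (s : List Int) : ∀ (res : List Int),
    s.Pairwise (· ≤ ·) → res.Pairwise (· < ·) →
    (∀ l, res.getLast? = some l → ∀ b ∈ s, l ≤ b) →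
    (s.foldl pvStep res).Pairwise (· < ·) := by
  induction s with
  | nil => intro res _ hres _; simpa using hres
  | cons x t ih =>
    intro res hs hres hlast
    have hxt : ∀ b ∈ t, x ≤ b := (List.pairwise_cons.mp hs).1
    have ht : t.Pairwise (· ≤ ·) := (List.pairwise_cons.mp hs).2
    simp only [List.foldl_cons]
    unfold pvStep
    split_ifs with h
    · refine ih (res ++ [x]) ht ?_ ?_
      · refine List.pairwise_append.mpr ⟨hres, by simp, ?_⟩
        intro a ha b hb
        simp only [List.mem_singleton] at hb
        rw [hb]
        rcases h with hnil | hne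
        · subst hnil; simp at ha
        · cases hgl : res.getLast? with
          | none => exact absurd (List.getLast?_eq_none_iff.mp hgl) (by rintro rfl; simp at ha)
          | some l =>
            have hlx : l ≤ x := hlast l hgl x (List.mem_cons_self ..)

            have hlx' : l ≠ x := fun he => hne (by rw [hgl, he])
            have := pvLe_getLast res hres l hgl a ha
            omega
      · intro l hl b hb
        rw [List.getLast?_concat] at hl
        cases hl
        exact hxt b hb
    · push Not at h
      refine ih res ht hres ?_
      intro l hl b hb
      rw [h.2] at hl; cases hl
      exact hxt b hb

-- B computes sorted(set(flat)) for its flattened list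
lemma pvAlt_eq (frames_list : List (List Int)) :
    find_frame_unions_alt frames_list =
      PySem.List.sorted
        (PySem.Set.ofList (frames_list.foldl (fun acc frames => acc ++ frames) []))
        (fun x => x) false := by
  unfold find_frame_unions_alt
  show (PySem.List.sorted (frames_list.foldl (fun acc frames => acc ++ frames) []) (fun x => x) false).foldl pvStep []
      = _
  set flat := frames_list.foldl (fun acc frames => acc ++ frames) [] with hflat
  set s := PySem.List.sorted flat (fun x => x) false with hs
  have hspw : s.Pairwise (· ≤ ·) := by
    simpa using PySem.List.sorted_pairwise flat (fun x => x)
  have hw := pvWalk_pairwise s [] hspw (by simp) (by simp)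
  have hnd : (s.foldl pvStep []).Nodup := hw.imp ne_of_lt
  have hperm : (s.foldl pvStep []).Perm (PySem.Set.ofList flat) := by
    refine (List.perm_ext_iff_of_nodup hnd (PySem.Set.nodup_ofList flat)).mpr ?_
    intro y
    rw [pvWalk_mem]
    simp [hs, PySem.List.mem_sorted, PySem.Set.mem_ofList]
  exact (PySem.List.sorted_eq_of_perm_of_pairwise_lt _ _ _ hperm (by simpa using hw)).symm

lemma pvUnionFold_nodup (L : List (PySem.Set Int)) : ∀ (u : PySem.Set Int), u.Nodup →
    (L.foldl (fun u s => PySem.Set.union u s) u).Nodup := by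
  induction L with
  | nil => intro u hu; simpa using hu
  | cons a t ih => intro u hu; exact ih _ (PySem.Set.nodup_union _ _ hu)

lemma pvUnionFold_mem (L : List (PySem.Set Int)) : ∀ (u : PySem.Set Int) (y : Int),
    y ∈ L.foldl (fun u s => PySem.Set.union u s) u ↔ y ∈ u ∨ ∃ l ∈ L, y ∈ l := by
  induction L with
  | nil => simp
  | cons a t ih =>
    intro u y
    simp only [List.foldl_cons, ih, PySem.Set.mem_union, List.mem_cons]
    constructor
    · rintro ((h | h) | ⟨l, hl, hy⟩)
      · exact Or.inl h
      · exact Or.inr ⟨a, Or.inl rfl, h⟩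
      · exact Or.inr ⟨l, Or.inr hl, hy⟩
    · rintro (h | ⟨l, (rfl | hl), hy⟩)
      · exact Or.inl (Or.inl h)
      · exact Or.inl (Or.inr hy)
      · exact Or.inr ⟨l, hl, hy⟩

lemma pvFlatMap_singleton (L : List (List Int)) :
    L.flatMap (fun frames => [PySem.Set.ofList frames]) = L.map PySem.Set.ofList := by
  induction L with
  | nil => rfl
  | cons a t ih => simp [ih]

lemma pvFlat_mem (fl : List (List Int)) (y : Int) :
    y ∈ fl.foldl (fun acc frames => acc ++ frames) [] ↔ ∃ l ∈ fl, y ∈ l := by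
  rw [PySem.List.foldl_append_eq_flatMap]
  simp

-- ===== VERDICT (by name: the statement is the Claim_ definition above) =====
theorem find_frame_unions_spec : Claim_equal_find_frame_unions := by
  intro fl _
  unfold Spec_find_frame_unions
  rw [pvAlt_eq]
  unfold find_frame_unions
  split_ifs with h0
  · subst h0; simp [PySem.List.sorted]
  · cases fl with
    | nil => exact absurd rfl h0
    | cons f0 rest =>
      have hsets :
          (f0 :: rest).foldl (fun acc frames => acc ++ [PySem.Set.ofList frames]) []
            = (f0 :: rest).map PySem.Set.ofList := by
        rw [PySem.List.foldl_append_eq_flatMap, List.nil_append, pvFlatMap_singleton]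
      simp only [hsets, List.map_cons, List.headD_cons, List.drop_succ_cons, List.drop_zero]
      set U := (rest.map PySem.Set.ofList).foldl (fun u s => PySem.Set.union u s)
          (PySem.Set.ofList f0) with hU
      have hndU : U.Nodup := pvUnionFold_nodup _ _ (PySem.Set.nodup_ofList f0)
      have hmemU : ∀ y, y ∈ U ↔ y ∈ (f0 :: rest).foldl (fun acc frames => acc ++ frames) [] := by
        intro y
        rw [hU, pvUnionFold_mem, pvFlat_mem]
        simp only [PySem.Set.mem_ofList, List.mem_cons, List.mem_map]
        constructor
        · rintro (h | ⟨l, ⟨l', hl', rfl⟩, hy⟩)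
          · exact ⟨f0, Or.inl rfl, h⟩
          · exact ⟨l', Or.inr hl', (PySem.Set.mem_ofList ..).mp hy⟩
        · rintro ⟨l, (rfl | hl), hy⟩
          · exact Or.inl hy
          · exact Or.inr ⟨PySem.Set.ofList l, ⟨l, hl, rfl⟩, (PySem.Set.mem_ofList ..).mpr hy⟩
      have hperm : U.Perm (PySem.Set.ofList ((f0 :: rest).foldl (fun acc frames => acc ++ frames) [])) := by
        refine (List.perm_ext_iff_of_nodup hndU (PySem.Set.nodup_ofList _)).mpr ?_
        intro y; rw [hmemU]; simp [PySem.Set.mem_ofList]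
      have hsorted := (PySem.List.sorted_id_eq_sorted_id_iff_perm (xs := U)
          (ys := PySem.Set.ofList ((f0 :: rest).foldl (fun acc frames => acc ++ frames) []))).mpr hperm
      split_ifs with hUe
      · rw [← hsorted, hUe]; simp [PySem.List.sorted]
      · exact hsorted
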